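-- pv_equiv track=rewrite | github.com/SaiSriramKamineni/Typing-Speed-Test-Application-Python-GUI | type.py | typing_errors
-- ===== SOURCE A (Python) =====
-- def typing_errors(prompt, input_text):
--     prompt_words = prompt.split()
--     input_words = input_text.split()
--     errors = 0
--
--     for i in range(len(input_words)):
--         if i < len(prompt_words):
--             if input_words[i] != prompt_words[i]:
--                 errors += 1
--         else:
--             errors += 1
--
--     # Adding the words from the prompt that were not typed
--     errors += len(prompt_words) - len(input_words)
--
--     return errors
-- ===== SOURCE B (Python) =====
-- def typing_errors(prompt, input_text):
--     # Every prompt word counts as an error unless it is matched by the word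
--     # typed at the same position; extra input words each cancel against the
--     # subtraction in A, so the answer is simply len(prompt_words) - matches.
--     def matched(ps, qs):
--         if not ps or not qs:
--             return 0
--         return (ps[0] == qs[0]) + matched(ps[1:], qs[1:])
--
--     prompt_words = prompt.split()
--     return len(prompt_words) - matched(prompt_words, input_text.split())
-- ===== Notes on version B (the rewrite author's own statement) =====
-- stated objective: alternative
-- what changed: B inverts the problem: instead of accumulating errors over an index loop and fixing up with a final len(prompt)-len(input) term, it recursively counts the MATCHING positions of the two word lists and returns len(prompt_words) minus that count, using the identity that extra input words cancel against A's final subtraction.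
import Mathlib
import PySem

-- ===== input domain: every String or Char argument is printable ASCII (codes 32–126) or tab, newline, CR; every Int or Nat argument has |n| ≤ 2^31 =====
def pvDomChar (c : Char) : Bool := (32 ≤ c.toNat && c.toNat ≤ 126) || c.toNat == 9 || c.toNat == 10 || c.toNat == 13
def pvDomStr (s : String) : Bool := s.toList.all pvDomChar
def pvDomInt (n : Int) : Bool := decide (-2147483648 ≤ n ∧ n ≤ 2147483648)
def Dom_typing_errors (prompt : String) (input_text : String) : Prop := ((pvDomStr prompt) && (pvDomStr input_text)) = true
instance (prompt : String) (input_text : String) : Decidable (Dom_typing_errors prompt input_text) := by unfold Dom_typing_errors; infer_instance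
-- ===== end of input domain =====

-- B inverts the count: it recursively counts MATCHING positions of the two word lists and
-- returns len(prompt_words) minus that count, instead of A's error-accumulating index loop
-- with its final len(prompt)-len(input) fix-up; objective: alternative.

-- ===== PORT A =====
def typing_errors (prompt : String) (input_text : String) : Int :=
  let prompt_words := PySem.Str.split₀ prompt
  let input_words := PySem.Str.split₀ input_text
  let errors : Int :=
    (PySem.List.pyRange 0 (input_words.length : Int) 1).foldl
      (fun errors i =>
        if i < (prompt_words.length : Int) then
          if PySem.List.pyGet? input_words i ≠ PySem.List.pyGet? prompt_words i then errors + 1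
          else errors
        else errors + 1) 0
  errors + ((prompt_words.length : Int) - (input_words.length : Int))

-- ===== PORT B =====
-- Source B's recursive helper `matched`: number of positions where both lists carry equal words.
def pvMatched : List String → List String → Int
  | [], _ => 0
  | _, [] => 0
  | p :: ps, q :: qs => (if p == q then 1 else 0) + pvMatched ps qs

def typing_errors_alt (prompt : String) (input_text : String) : Int :=
  let prompt_words := PySem.Str.split₀ prompt
  (prompt_words.length : Int) - pvMatched prompt_words (PySem.Str.split₀ input_text)

-- ===== PRECONDITION & SPEC =====
def Spec_typing_errors (prompt : String) (input_text : String) (out : Int) : Prop := out = typing_errors_alt prompt input_text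
instance (prompt : String) (input_text : String) (out : Int) : Decidable (Spec_typing_errors prompt input_text out) := by unfold Spec_typing_errors; infer_instance

-- ===== CLAIM (what is proved, stated in full; the proofs are below) =====
def Claim_equal_typing_errors : Prop := ∀ (prompt : String) (input_text : String), Dom_typing_errors prompt input_text → Spec_typing_errors prompt input_text (typing_errors prompt input_text)

-- ===== LEMMAS AND PROOFS =====

-- A's loop over range(len(input_words)), started at offset a, equals the mismatch count over
-- the zipped remainders plus one error per extra input word.
lemma typing_errors_loop (P Q : List String) :
    ∀ (q p : List String) (a : Nat) (e : Int),
      P.drop a = p → Q.drop a = q → a + q.length = Q.length →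
      (PySem.List.pyRange a (Q.length : Int) 1).foldl
        (fun errors i =>
          if i < (P.length : Int) then
            if PySem.List.pyGet? Q i ≠ PySem.List.pyGet? P i then errors + 1
            else errors
          else errors + 1) e
      = e + ((p.zip q).countP (fun pq => pq.1 != pq.2) : Int)
          + ((q.length - p.length : Nat) : Int) := by
  intro q
  induction q with
  | nil =>
    intro p a e hP hQ hlen
    have hb : (Q.length : Int) ≤ (a : Int) := by
      simp only [List.length_nil, Nat.add_zero] at hlen; omega
    rw [PySem.List.pyRange_one_eq_nil hb]
    simp
  | cons x q' ih =>
    intro p a e hP hQ hlen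
    have hlen' : a + (q'.length + 1) = Q.length := by
      simpa [List.length_cons] using hlen
    have ha : (a : Int) < (Q.length : Int) := by omega
    rw [PySem.List.pyRange_one_cons ha]
    have hQa : PySem.List.pyGet? Q (a : Int) = some x := by
      rw [PySem.List.pyGet?_natCast]
      have : (Q.drop a)[0]? = Q[a + 0]? := List.getElem?_drop ..
      simp [hQ] at this
      simpa using this.symm
    have htQ : Q.drop (a + 1) = q' := by
      rw [← List.tail_drop, hQ]; rfl
    have hcast : ((a : Int) + 1) = ((a + 1 : Nat) : Int) := by push_cast; ring
    cases p with
    | nil =>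
      have hPa : P.length ≤ a := by
        have := List.drop_eq_nil_iff.mp hP; omega
      have hcond : ¬ ((a : Int) < (P.length : Int)) := by omega
      have htP : P.drop (a + 1) = ([] : List String) := by
        apply List.drop_eq_nil_iff.mpr; omega
      simp only [List.foldl_cons, if_neg hcond]
      rw [hcast, ih [] (a + 1) (e + 1) htP htQ (by omega)]
      simp
      omega
    | cons y p' =>
      have hPlt : a < P.length := by
        by_contra h
        rw [List.drop_eq_nil_iff.mpr (by omega)] at hP
        exact List.cons_ne_nil _ _ hP.symm
      have hcond : (a : Int) < (P.length : Int) := by omega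
      have hPa : PySem.List.pyGet? P (a : Int) = some y := by
        rw [PySem.List.pyGet?_natCast]
        have : (P.drop a)[0]? = P[a + 0]? := List.getElem?_drop ..
        simp [hP] at this
        simpa using this.symm
      have htP : P.drop (a + 1) = p' := by
        rw [← List.tail_drop, hP]; rfl
      simp only [List.foldl_cons, if_pos hcond, hQa, hPa]
      by_cases hxy : x = y
      · rw [if_neg (by simp [hxy])]
        rw [hcast, ih p' (a + 1) e htP htQ (by omega)]
        simp [hxy]
      · rw [if_pos (by simpa using hxy)]
        rw [hcast, ih p' (a + 1) (e + 1) htP htQ (by omega)]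
        have hne : (y != x) = true := by simp [Ne.symm hxy]
        simp [hne]
        ring

-- mismatches in the overlap plus matches = overlap length (= min of the two lengths).
lemma mismatch_add_matched (ps : List String) : ∀ (qs : List String),
    ((ps.zip qs).countP (fun pq => pq.1 != pq.2) : Int) + pvMatched ps qs
      = (min ps.length qs.length : Int) := by
  induction ps with
  | nil => intro qs; simp [pvMatched]
  | cons p ps ih =>
    intro qs
    cases qs with
    | nil => simp [pvMatched]; positivity
    | cons q qs =>
      have ih' := ih qs
      simp only [List.zip_cons_cons, List.countP_cons, pvMatched, List.length_cons]
      by_cases h : p = q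
      · simp [h]
        push_cast
        omega
      · have hb : (p != q) = true := by simp [h]
        have hb' : (p == q) = false := by simp [h]
        simp [hb, hb']
        push_cast
        omega

-- ===== VERDICT (by name: the statement is the Claim_ definition above) =====
theorem typing_errors_spec : Claim_equal_typing_errors := by
  intro prompt input_text _hdom
  unfold Spec_typing_errors typing_errors typing_errors_alt
  set P := PySem.Str.split₀ prompt with hPdef
  set Q := PySem.Str.split₀ input_text with hQdef
  simp only []
  have h := typing_errors_loop P Q Q P 0 0 (by simp) (by simp) (by simp)
  rw [Nat.cast_zero] at h
  rw [h]
  have hm := mismatch_add_matched P Q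
  omega
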